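-- pv_equiv track=rewrite | github.com/pmbouman/sudoku | solver.py | sweep_rows
-- ===== SOURCE A (Python) =====
-- def neighbor_set_rows(target_cell):
--     """
--     Creates a set of eight cell namess, excluding thr target cell,
--     to check when sweeping rows columns or subsquares
--     """
--     neighbor_set = [target_cell[0] + str(i) for i in range(1, 10)]
--     neighbor_set.remove(target_cell)
--     return neighbor_set
--
-- def sweep_rows(puzzle, target_cell):
--     toreturn = {}
--
--     target_value = puzzle[target_cell]["Allowable"]
--     # Note thaat a singleton will still be a set of one"
--
--     neighbor_set = neighbor_set_rows(target_cell)
--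
--     all_cell_names = puzzle.keys()
--     for cellname in all_cell_names:
--         cellval = puzzle[cellname]
--         if (cellname in neighbor_set):
--             fromset = puzzle[cellname]["Allowable"]
--             fromset = fromset - target_value
--             cellval["Allowable"] = fromset
--         toreturn.update({cellname:  cellval})
--     return toreturn
-- ===== SOURCE B (Python) =====
-- def neighbor_set_rows(target_cell):
--     neighbor_set = [target_cell[0] + str(i) for i in range(1, 10)]
--     neighbor_set.remove(target_cell)
--     return neighbor_set
--
-- def sweep_rows(puzzle, target_cell):
--     # Shallow copy up front; then update only the 8 same-row neighbors in place
--     # (inner cell dicts are shared with the copy, as in the original).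
--     toreturn = dict(puzzle)
--     target_value = puzzle[target_cell]["Allowable"]
--     for name in neighbor_set_rows(target_cell):
--         if name in puzzle:
--             cell = puzzle[name]
--             cell["Allowable"] = cell["Allowable"] - target_value
--     return toreturn
-- ===== Notes on version B (the rewrite author's own statement) =====
-- stated objective: simpler
-- what changed: B replaces A's rebuild-the-whole-dict loop (scanning every cell and testing each name against the 8-name neighbor list) with a shallow dict copy plus a loop over only the 8 neighbor names, updating each one present in the puzzle.
import Mathlib
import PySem

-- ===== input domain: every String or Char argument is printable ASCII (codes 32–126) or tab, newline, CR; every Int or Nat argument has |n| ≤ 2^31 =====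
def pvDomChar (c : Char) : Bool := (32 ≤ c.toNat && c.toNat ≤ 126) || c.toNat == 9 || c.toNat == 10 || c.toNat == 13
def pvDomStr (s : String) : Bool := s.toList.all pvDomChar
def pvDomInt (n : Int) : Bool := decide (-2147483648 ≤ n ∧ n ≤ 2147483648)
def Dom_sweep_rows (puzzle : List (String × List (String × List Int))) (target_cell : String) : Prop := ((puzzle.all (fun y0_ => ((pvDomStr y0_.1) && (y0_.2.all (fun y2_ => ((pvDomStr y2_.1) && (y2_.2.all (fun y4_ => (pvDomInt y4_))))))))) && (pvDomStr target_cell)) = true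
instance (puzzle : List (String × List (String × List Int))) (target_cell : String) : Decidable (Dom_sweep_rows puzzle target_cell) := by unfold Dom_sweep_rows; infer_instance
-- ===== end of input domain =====

-- B replaces A's scan over every cell (with a membership test against the 8-name
-- neighbor list) by a bulk copy plus a targeted update of only the 8 neighbors.
-- Both A and B mutate the inner cell dicts of `puzzle` in place (A and B perform
-- the same mutations); the equivalence proved here is about the RETURN value.

-- ===== PORT A =====
-- target_cell[0] + str(i) is built as String.ofList (c :: toChars i): exact
-- concatenation of the 1-char string with str(i).  none = IndexError ("" target)
-- or ValueError (target_cell not of the form target_cell[0] + digit 1..9).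
def neighbor_set_rows (target_cell : String) : Option (List String) :=
  (PySem.Str.pyGet? target_cell 0).bind (fun c =>
    PySem.List.remove?
      ((PySem.List.pyRange 1 10 1).map (fun i => String.ofList (c :: PySem.Int.toChars i)))
      target_cell)

-- A's loop over puzzle.keys(): build toreturn cell by cell, replacing "Allowable"
-- of the cells whose name is in neighbor_set.  none = KeyError on a neighbor
-- without an "Allowable" key (excluded by Pre_).
def sweepCellsA (ns : List String) (tv : List Int) :
    List (String × List (String × List Int)) → Option (List (String × List (String × List Int)))
  | [] => some []
  | (cellname, cellval) :: rest =>
    if ns.contains cellname then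
      match (PySem.Dict.mk cellval).get? "Allowable" with
      | none => none
      | some fromset =>
        match sweepCellsA ns tv rest with
        | none => none
        | some r =>
          some ((cellname,
            ((PySem.Dict.mk cellval).insert "Allowable" (PySem.Set.diff fromset tv)).items) :: r)
    else
      match sweepCellsA ns tv rest with
      | none => none
      | some r => some ((cellname, cellval) :: r)

def sweep_rows (puzzle : List (String × List (String × List Int))) (target_cell : String) :
    List (String × List (String × List Int)) :=
  match (PySem.Dict.mk puzzle).get? target_cell with
  | none => []                       -- KeyError (outside Pre_)
  | some tcell =>
    match (PySem.Dict.mk tcell).get? "Allowable" with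
    | none => []                     -- KeyError (outside Pre_)
    | some target_value =>
      match neighbor_set_rows target_cell with
      | none => []                   -- IndexError/ValueError (outside Pre_)
      | some neighbor_set =>
        match sweepCellsA neighbor_set target_value puzzle with
        | none => []                 -- KeyError (outside Pre_)
        | some toreturn => toreturn

-- ===== PORT B =====
def neighbor_set_rows_alt (target_cell : String) : Option (List String) :=
  (PySem.Str.pyGet? target_cell 0).bind (fun c =>
    PySem.List.remove?
      ((PySem.List.pyRange 1 10 1).map (fun i => String.ofList (c :: PySem.Int.toChars i)))
      target_cell)

-- body of B's loop: if name is a key of puzzle, replace its "Allowable" set.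
-- The inner `none` arm is a KeyError in Python B (excluded by Pre_).
def stepB (tv : List Int) (pz : List (String × List (String × List Int))) (name : String) :
    List (String × List (String × List Int)) :=
  match (PySem.Dict.mk pz).get? name with
  | none => pz
  | some cell =>
    match (PySem.Dict.mk cell).get? "Allowable" with
    | none => pz
    | some fs =>
      ((PySem.Dict.mk pz).insert name
        (((PySem.Dict.mk cell).insert "Allowable" (PySem.Set.diff fs tv)).items)).items

-- toreturn = dict(puzzle) shares the inner cell dicts, so the value returned is
-- puzzle with the present neighbors' "Allowable" replaced.
def sweep_rows_alt (puzzle : List (String × List (String × List Int))) (target_cell : String) :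
    List (String × List (String × List Int)) :=
  match (PySem.Dict.mk puzzle).get? target_cell with
  | none => []
  | some tcell =>
    match (PySem.Dict.mk tcell).get? "Allowable" with
    | none => []
    | some target_value =>
      match neighbor_set_rows_alt target_cell with
      | none => []
      | some neighbor_set => neighbor_set.foldl (stepB target_value) puzzle

-- ===== PRECONDITION & SPEC =====
-- shapeRowB target name : name is a 2-character cell name in target's row with a
-- row digit 1..9 (this covers the 8 neighbors and the target itself).
def shapeRowB (target_cell name : String) : Bool :=
  name.toList.length == 2 &&
  name.toList.take 1 == target_cell.toList.take 1 &&
  (name.toList.drop 1).all (fun ch => decide ('1' ≤ ch) && decide (ch ≤ '9'))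

-- Pre_ = the inputs on which the Python A returns normally, restricted to lists
-- that encode Python dicts: the first two conjuncts exclude association lists
-- with duplicate outer or inner keys, which do not represent a Python dict (a
-- Python dict cannot contain them); the rest excludes A's raises: a malformed
-- target name (IndexError/ValueError), a missing target cell or missing
-- "Allowable" key (KeyError), and a same-row neighbor present without an
-- "Allowable" key (KeyError).
def Pre_sweep_rows (puzzle : List (String × List (String × List Int))) (target_cell : String) : Prop :=
  (puzzle.map Prod.fst).Nodup ∧
  (∀ p ∈ puzzle, (p.2.map Prod.fst).Nodup) ∧
  shapeRowB target_cell target_cell = true ∧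
  (((PySem.Dict.mk puzzle).get? target_cell).bind
      (fun cv => (PySem.Dict.mk cv).get? "Allowable")).isSome = true ∧
  (∀ p ∈ puzzle, shapeRowB target_cell p.1 = true →
      ((PySem.Dict.mk p.2).get? "Allowable").isSome = true)

instance (puzzle : List (String × List (String × List Int))) (target_cell : String) :
    Decidable (Pre_sweep_rows puzzle target_cell) := by unfold Pre_sweep_rows; infer_instance

def pvWitness_sweep_rows : (List (String × List (String × List Int))) × String :=
  ([("a1", [("Allowable", [1, 2])]), ("a2", [("Allowable", [2, 3])]), ("b1", [])], "a1")

def Spec_sweep_rows (puzzle : List (String × List (String × List Int))) (target_cell : String) (out : List (String × List (String × List Int))) : Prop := out = sweep_rows_alt puzzle target_cell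
instance (puzzle : List (String × List (String × List Int))) (target_cell : String) (out : List (String × List (String × List Int))) : Decidable (Spec_sweep_rows puzzle target_cell out) := by unfold Spec_sweep_rows; infer_instance

-- ===== CLAIM (what is proved, stated in full; the proofs are below) =====
def Claim_equal_sweep_rows : Prop := ∀ (puzzle : List (String × List (String × List Int))) (target_cell : String), Dom_sweep_rows puzzle target_cell → Pre_sweep_rows puzzle target_cell → Spec_sweep_rows puzzle target_cell (sweep_rows puzzle target_cell)

-- ===== LEMMAS AND PROOFS =====

-- the replacement both programs perform on a cell's inner dict
def updCell (tv : List Int) (cv : List (String × List Int)) : List (String × List Int) :=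
  match (PySem.Dict.mk cv).get? "Allowable" with
  | none => cv
  | some fs => ((PySem.Dict.mk cv).insert "Allowable" (PySem.Set.diff fs tv)).items

lemma sweepCellsA_eq (ns : List String) (tv : List Int)
    (l : List (String × List (String × List Int)))
    (h : ∀ p ∈ l, ns.contains p.1 = true → ((PySem.Dict.mk p.2).get? "Allowable").isSome = true) :
    sweepCellsA ns tv l =
      some (l.map (fun p => if ns.contains p.1 then (p.1, updCell tv p.2) else p)) := by
  induction l with
  | nil => rfl
  | cons p rest ih =>
    obtain ⟨name, cv⟩ := p
    have hrest := ih (fun q hq hc => h q (List.mem_cons_of_mem _ hq) hc)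
    by_cases hc : ns.contains name = true
    · have hm : name ∈ ns := by simpa using hc
      obtain ⟨fs, hfs⟩ := Option.isSome_iff_exists.mp (h (name, cv) (List.mem_cons_self ..) hc)
      simp [sweepCellsA, hm, hfs, hrest, updCell]
    · have hm : name ∉ ns := by simpa using hc
      simp [sweepCellsA, hm, hrest]

lemma foldl_stepB_eq (tv : List Int) (ns : List String)
    (l : List (String × List (String × List Int)))
    (hns : ns.Nodup) (hnd : (l.map Prod.fst).Nodup)
    (h : ∀ p ∈ l, ns.contains p.1 = true → ((PySem.Dict.mk p.2).get? "Allowable").isSome = true) :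
    ns.foldl (stepB tv) l =
      l.map (fun p => if ns.contains p.1 then (p.1, updCell tv p.2) else p) := by
  induction ns generalizing l with
  | nil => simp
  | cons n ns' ih =>
    have hn' : n ∉ ns' := (List.nodup_cons.mp hns).1
    rw [List.foldl_cons]
    cases hg : (PySem.Dict.mk l).get? n with
    | none =>
      have hnk : n ∉ l.map Prod.fst := by
        have := (PySem.Dict.get?_eq_none_iff_not_mem_keys
          (d := PySem.Dict.mk l) (k := n)).mp hg
        simpa [PySem.Dict.keys_mk] using this
      have hstep : stepB tv l n = l := by simp [stepB, hg]
      rw [hstep, ih l (List.nodup_cons.mp hns).2 hnd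
        (fun q hq hc => h q hq (by simp at hc ⊢; exact Or.inr hc))]
      apply List.map_congr_left
      intro p hp
      have hpn : p.1 ≠ n := fun e => hnk (e ▸ List.mem_map_of_mem hp)
      simp [hpn]
    | some cv =>
      have hmem : (n, cv) ∈ l := PySem.Dict.mem_items_of_get?_eq_some _ hg
      obtain ⟨fs, hfs⟩ := Option.isSome_iff_exists.mp
        (h (n, cv) hmem (by simp))
      have hcont : (PySem.Dict.mk l).contains n = true := by
        rw [PySem.Dict.contains_eq_isSome_get?, hg]; rfl
      have hstep : stepB tv l n =
          l.map (fun p => if p.1 = n then (p.1, updCell tv p.2) else p) := by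
        simp only [stepB, hg, hfs]
        rw [PySem.Dict.items_insert_of_contains _ _ hcont]
        apply List.map_congr_left
        intro p hp
        by_cases he : p.1 = n
        · have hget : (PySem.Dict.mk l).get? p.1 = some p.2 :=
            PySem.Dict.get?_of_mem_items _ (by simpa using hp)
              (by simpa [PySem.Dict.keys_mk] using hnd)
          rw [he, hg] at hget
          have hcv : cv = p.2 := by injection hget
          simp [he, ← hcv, updCell, hfs]
        · simp [he]
      rw [hstep]
      have hfst : ((l.map (fun p => if p.1 = n then (p.1, updCell tv p.2) else p)).map
          Prod.fst) = l.map Prod.fst := by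
        rw [List.map_map]
        apply List.map_congr_left
        intro p _
        by_cases he : p.1 = n <;> simp [he]
      rw [ih _ (List.nodup_cons.mp hns).2 (by rw [hfst]; exact hnd) ?_]
      · rw [List.map_map]
        apply List.map_congr_left
        intro p _
        by_cases he : p.1 = n
        · simp [Function.comp, he, hn']
        · simp [Function.comp, he]
      · intro q hq hc
        obtain ⟨p, hp, rfl⟩ := List.mem_map.mp hq
        by_cases he : p.1 = n
        · exfalso
          simp only [he] at hc
          simp at hc
          exact hn' (by simpa [he] using hc)
        · simp only [if_neg he] at hc ⊢
          exact h p hp (by simp at hc ⊢; exact Or.inr hc)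

-- ===== VERDICT (by name: the statement is the Claim_ definition above) =====
theorem sweep_rows_spec : Claim_equal_sweep_rows := by
  intro puzzle target_cell _hdom hpre
  obtain ⟨hnd, _hinner, hshape, hget, hnb⟩ := hpre
  unfold Spec_sweep_rows
  cases hg1 : (PySem.Dict.mk puzzle).get? target_cell with
  | none => rw [hg1] at hget; simp at hget
  | some tcell =>
  cases hg2 : (PySem.Dict.mk tcell).get? "Allowable" with
  | none => rw [hg1] at hget; simp [hg2] at hget
  | some tv =>
  have halt : neighbor_set_rows_alt target_cell = neighbor_set_rows target_cell := rfl
  cases hns : neighbor_set_rows target_cell with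
  | none => simp [sweep_rows, sweep_rows_alt, hg1, hg2, halt, hns]
  | some ns =>
    cases hc0 : PySem.Str.pyGet? target_cell 0 with
    | none => rw [neighbor_set_rows, hc0] at hns; simp at hns
    | some c =>
      have hns0 := hns
      rw [neighbor_set_rows, hc0] at hns
      simp only [Option.bind_some] at hns
      have hLc : (PySem.List.pyRange 1 10 1).map
          (fun i => String.ofList (c :: PySem.Int.toChars i)) =
          [String.ofList [c,'1'], String.ofList [c,'2'], String.ofList [c,'3'],
           String.ofList [c,'4'], String.ofList [c,'5'], String.ofList [c,'6'],
           String.ofList [c,'7'], String.ofList [c,'8'], String.ofList [c,'9']] := rfl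
      rw [hLc] at hns
      have hnodupL : ([String.ofList [c,'1'], String.ofList [c,'2'], String.ofList [c,'3'],
           String.ofList [c,'4'], String.ofList [c,'5'], String.ofList [c,'6'],
           String.ofList [c,'7'], String.ofList [c,'8'], String.ofList [c,'9']]).Nodup := by
        simp [String.ext_iff]
      have hmemT : target_cell ∈ [String.ofList [c,'1'], String.ofList [c,'2'],
           String.ofList [c,'3'], String.ofList [c,'4'], String.ofList [c,'5'],
           String.ofList [c,'6'], String.ofList [c,'7'], String.ofList [c,'8'],
           String.ofList [c,'9']] := by
        by_contra hmem
        rw [(PySem.List.remove?_eq_none_iff _ _).mpr hmem] at hns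
        simp at hns
      have hns' : ns = ([String.ofList [c,'1'], String.ofList [c,'2'], String.ofList [c,'3'],
           String.ofList [c,'4'], String.ofList [c,'5'], String.ofList [c,'6'],
           String.ofList [c,'7'], String.ofList [c,'8'], String.ofList [c,'9']]).erase
             target_cell := by
        rw [PySem.List.remove?_eq_some_erase _ _ hmemT] at hns
        exact (Option.some_inj.mp hns).symm
      have hnodup : ns.Nodup := hns' ▸ hnodupL.erase _
      -- target_cell.toList = [c, d]
      have hsh := hshape
      simp only [shapeRowB, Bool.and_eq_true, beq_iff_eq] at hsh
      obtain ⟨⟨hlen, _⟩, _⟩ := hsh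
      obtain ⟨a, d, htl⟩ := List.length_eq_two.mp (by exact_mod_cast hlen)
      have hac : a = c := by
        have : target_cell.toList[0]? = some c := by
          simpa [PySem.List.pyGet?_zero] using hc0
        rw [htl] at this
        simpa using this
      subst hac
      have hcond : ∀ p ∈ puzzle, ns.contains p.1 = true →
          ((PySem.Dict.mk p.2).get? "Allowable").isSome = true := by
        intro p hp hc
        apply hnb p hp
        have hmem : p.1 ∈ ns := by simpa using hc
        have h9 := hns' ▸ hmem
        have h9' := List.mem_of_mem_erase h9
        simp only [List.mem_cons, List.not_mem_nil, or_false] at h9'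
        rcases h9' with h|h|h|h|h|h|h|h|h <;>
          simp [h, shapeRowB, htl]
      have hA := sweepCellsA_eq ns tv puzzle hcond
      have hB := foldl_stepB_eq tv ns puzzle hnodup hnd hcond
      simp [sweep_rows, sweep_rows_alt, hg1, hg2, halt, hns0, hA, hB]
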